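-- pv_equiv track=rewrite | github.com/Aasthaengg/IBMdataset | Python_codes/p03806/s742269711.py | halfcomb
-- ===== SOURCE A (Python) =====
-- def halfcomb(l):
--     n = len(l)
--     n1 = n//2
--     n2 = (n+1)//2
--     l1 = []
--     l2 = []
--
--     for b in range(1, 1<<n2):
--         v11, v12 = 0, 0
--         v21, v22 = 0, 0
--         for i in range(n2):
--             if b&1<<i:
--                 item = l[n1+i]
--                 v21+=item[0]
--                 v22+=item[1]
--                 if b<(1<<n1) and i<n1:
--                     item = l[i]
--                     v11+=item[0]
--                     v12+=item[1]
--         if b<(1<<n1):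
--             l1.append((v11,v12))
--         l2.append((v21,v22))
--     return l1, l2
-- ===== SOURCE B (Python) =====
-- def halfcomb(l):
--     n1 = len(l) // 2
--
--     def subsums(items):
--         # doubling DP: each processed item doubles the table; mask order matches
--         # enumerating masks 0..2^k-1 with bit j <-> items[j]
--         s = [(0, 0)]
--         for x, y in items:
--             s += [(a + x, b + y) for (a, b) in s]
--         return s[1:]
--
--     return subsums(l[:n1]), subsums(l[n1:])
-- ===== Notes on version B (the rewrite author's own statement) =====
-- stated objective: alternative
-- what changed: Replaces A's per-mask inner loop over all bit positions by an incremental doubling DP that extends the subset-sum table one item at a time, deriving each sum from a previous table entry in O(1) (O(2^(n/2)) work vs A's O(2^(n/2)*n); measured 8.55x at n=1024 but not confirmed at the largest probe size, so not claimed as faster).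
import Mathlib
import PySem

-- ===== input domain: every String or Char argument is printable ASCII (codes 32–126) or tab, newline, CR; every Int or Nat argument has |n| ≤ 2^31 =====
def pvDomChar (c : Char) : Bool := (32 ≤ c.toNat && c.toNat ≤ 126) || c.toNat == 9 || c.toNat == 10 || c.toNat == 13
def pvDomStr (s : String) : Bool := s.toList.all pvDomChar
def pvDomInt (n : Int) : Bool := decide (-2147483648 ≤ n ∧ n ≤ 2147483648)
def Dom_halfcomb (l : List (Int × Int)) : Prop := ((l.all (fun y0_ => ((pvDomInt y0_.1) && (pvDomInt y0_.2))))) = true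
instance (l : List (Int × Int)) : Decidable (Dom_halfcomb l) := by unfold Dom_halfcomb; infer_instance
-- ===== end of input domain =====

-- B replaces A's per-mask inner bit loop by a doubling subset-sum DP (each item doubles the
-- table, each entry derived from an earlier one in O(1)); same values in the same order.

-- ===== PORT A =====
def halfcomb (l : List (Int × Int)) : (List (Int × Int)) × (List (Int × Int)) :=
  let n := l.length
  let n1 := n / 2
  let n2 := (n + 1) / 2
  ((List.range (2 ^ n2)).drop 1).foldl
    (fun acc b =>
      let v := (List.range n2).foldl
        (fun (s : (Int × Int) × (Int × Int)) i =>
          if b.testBit i then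
            let item := (PySem.List.pyGet? l ((n1 + i : Nat) : Int)).getD (0, 0)
            let s := (s.1, (s.2.1 + item.1, s.2.2 + item.2))
            if b < 2 ^ n1 ∧ i < n1 then
              let item := (PySem.List.pyGet? l ((i : Nat) : Int)).getD (0, 0)
              ((s.1.1 + item.1, s.1.2 + item.2), s.2)
            else s
          else s)
        ((0, 0), (0, 0))
      ((if b < 2 ^ n1 then acc.1 ++ [v.1] else acc.1), acc.2 ++ [v.2]))
    ([], [])

-- ===== PORT B =====
-- B-side helper: the full doubling table 's' (including the empty subset at index 0)
def subsumsAll (items : List (Int × Int)) : List (Int × Int) :=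
  items.foldl (fun s p => s ++ s.map (fun q => (q.1 + p.1, q.2 + p.2))) [(0, 0)]

def subsums (items : List (Int × Int)) : List (Int × Int) :=
  (subsumsAll items).drop 1

def halfcomb_alt (l : List (Int × Int)) : (List (Int × Int)) × (List (Int × Int)) :=
  let n1 := l.length / 2
  (subsums (l.take n1), subsums (l.drop n1))

-- ===== PRECONDITION & SPEC =====
def Spec_halfcomb (l : List (Int × Int)) (out : (List (Int × Int)) × (List (Int × Int))) : Prop := out = halfcomb_alt l
instance (l : List (Int × Int)) (out : (List (Int × Int)) × (List (Int × Int))) : Decidable (Spec_halfcomb l out) := by unfold Spec_halfcomb; infer_instance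

-- ===== CLAIM (what is proved, stated in full; the proofs are below) =====
def Claim_equal_halfcomb : Prop := ∀ (l : List (Int × Int)), Dom_halfcomb l → Spec_halfcomb l (halfcomb l)

-- ===== LEMMAS AND PROOFS =====

-- the subset sum selected by mask b over `items` (bit i ↔ items[i])
def msum (items : List (Int × Int)) (b : Nat) : Int × Int :=
  (List.range items.length).foldl
    (fun s i =>
      if b.testBit i then (s.1 + (items.getD i (0, 0)).1, s.2 + (items.getD i (0, 0)).2) else s)
    (0, 0)

theorem foldl_id {α β : Type} (xs : List α) (a : β) :
    xs.foldl (fun s _ => s) a = a := by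
  induction xs <;> simp [List.foldl, *]

-- characterisation of B's table: subsumsAll lists msum over all masks in order
theorem subsumsAll_eq (items : List (Int × Int)) :
    subsumsAll items = (List.range (2 ^ items.length)).map (msum items) := by
  induction items using List.reverseRecOn with
  | nil => simp [subsumsAll, msum]
  | append_singleton items p ih =>
    have hk : (items ++ [p]).length = items.length + 1 := by simp
    have hmsum_lo : ∀ m : Nat, msum (items ++ [p]) m =
        (if m.testBit items.length
          then ((msum items m).1 + ((items ++ [p]).getD items.length (0,0)).1,
                (msum items m).2 + ((items ++ [p]).getD items.length (0,0)).2)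
          else msum items m) := by
      intro m
      unfold msum
      rw [hk, List.range_succ, List.foldl_append]
      have : (List.range items.length).foldl
          (fun s i => if m.testBit i then (s.1 + ((items ++ [p]).getD i (0,0)).1,
            s.2 + ((items ++ [p]).getD i (0,0)).2) else s) ((0:Int), (0:Int)) =
          (List.range items.length).foldl
          (fun s i => if m.testBit i then (s.1 + (items.getD i (0,0)).1,
            s.2 + (items.getD i (0,0)).2) else s) ((0:Int), (0:Int)) := by
        apply PySem.List.foldl_congr_mem
        intro acc x hx
        have hxlt : x < items.length := List.mem_range.mp hx
        simp [List.getD, List.getElem?_append_left hxlt]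
      rw [this]
      simp [List.foldl]
    have hgetD : (items ++ [p]).getD items.length (0,0) = p := by
      simp [List.getD]
    have h2 : (2:Nat) ^ (items ++ [p]).length = 2 ^ items.length + 2 ^ items.length := by
      simp [pow_succ]; ring
    rw [show subsumsAll (items ++ [p]) =
        subsumsAll items ++ (subsumsAll items).map (fun q => (q.1 + p.1, q.2 + p.2)) by
      simp [subsumsAll, List.foldl_append]]
    rw [h2, List.range_add, List.map_append, ih, List.map_map, List.map_map]
    congr 1
    · -- low half: masks m < 2^k, top bit clear
      apply List.map_congr_left
      intro m hm
      have hmlt : m < 2 ^ items.length := List.mem_range.mp hm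
      rw [hmsum_lo m, Nat.testBit_lt_two_pow hmlt]
      simp
    · -- high half: masks 2^k + m, top bit set, low bits those of m
      apply List.map_congr_left
      intro m hm
      have hmlt : m < 2 ^ items.length := List.mem_range.mp hm
      simp only [Function.comp]
      rw [hmsum_lo (2 ^ items.length + m), Nat.testBit_two_pow_add_eq,
        Nat.testBit_lt_two_pow hmlt, hgetD]
      have hlow : msum items (2 ^ items.length + m) = msum items m := by
        unfold msum
        apply PySem.List.foldl_congr_mem
        intro acc x hx
        rw [Nat.testBit_two_pow_add_gt (List.mem_range.mp hx)]
      simp [hlow]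

-- A's inner loop, second accumulator: the subset sum over the upper half
theorem foldA_snd (l : List (Int × Int)) (b : Nat) :
    (List.range ((l.length + 1) / 2)).foldl
      (fun (s : Int × Int) i =>
        if b.testBit i
        then (s.1 + ((PySem.List.pyGet? l ((l.length / 2 + i : Nat) : Int)).getD (0,0)).1,
              s.2 + ((PySem.List.pyGet? l ((l.length / 2 + i : Nat) : Int)).getD (0,0)).2)
        else s) (0, 0) = msum (l.drop (l.length / 2)) b := by
  unfold msum
  have hlen : (l.drop (l.length / 2)).length = (l.length + 1) / 2 := by
    simp; omega
  rw [hlen]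
  apply PySem.List.foldl_congr_mem
  intro acc x hx
  simp only [List.getD, PySem.List.pyGet?_natCast, List.getElem?_drop]

-- A's inner loop, first accumulator (only used when b < 2^n1): the lower-half subset sum
theorem foldA_fst (l : List (Int × Int)) (b : Nat) (hb : b < 2 ^ (l.length / 2)) :
    (List.range ((l.length + 1) / 2)).foldl
      (fun (s : Int × Int) i =>
        if b.testBit i ∧ b < 2 ^ (l.length / 2) ∧ i < l.length / 2
        then (s.1 + ((PySem.List.pyGet? l ((i : Nat) : Int)).getD (0,0)).1,
              s.2 + ((PySem.List.pyGet? l ((i : Nat) : Int)).getD (0,0)).2)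
        else s) (0, 0) = msum (l.take (l.length / 2)) b := by
  have hsplit : (l.length + 1) / 2 = l.length / 2 + ((l.length + 1) / 2 - l.length / 2) := by
    omega
  rw [hsplit, List.range_add, List.foldl_append]
  have hhi : ∀ (a : Int × Int),
      ((List.range ((l.length + 1) / 2 - l.length / 2)).map (fun x => l.length / 2 + x)).foldl
        (fun (s : Int × Int) i =>
          if b.testBit i ∧ b < 2 ^ (l.length / 2) ∧ i < l.length / 2
          then (s.1 + ((PySem.List.pyGet? l ((i : Nat) : Int)).getD (0,0)).1,
                s.2 + ((PySem.List.pyGet? l ((i : Nat) : Int)).getD (0,0)).2)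
          else s) a = a := by
    intro a
    rw [PySem.List.foldl_congr_mem _ _ (fun s _ => s)]
    · exact foldl_id _ _
    · intro acc x hx
      simp only [List.mem_map] at hx
      obtain ⟨y, _, rfl⟩ := hx
      have : ¬ (l.length / 2 + y < l.length / 2) := by omega
      simp [this]
  rw [hhi]
  unfold msum
  have hlen : (l.take (l.length / 2)).length = l.length / 2 := by simp; omega
  rw [hlen]
  apply PySem.List.foldl_congr_mem
  intro acc x hx
  have hxlt : x < l.length / 2 := List.mem_range.mp hx
  simp [hxlt, hb, List.getD]

-- the combined state of A's inner loop splits into the two independent folds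
theorem foldA_split (l : List (Int × Int)) (b : Nat) :
    (List.range ((l.length + 1) / 2)).foldl
      (fun (s : (Int × Int) × (Int × Int)) i =>
        if b.testBit i then
          let item := (PySem.List.pyGet? l ((l.length / 2 + i : Nat) : Int)).getD (0, 0)
          let s := (s.1, (s.2.1 + item.1, s.2.2 + item.2))
          if b < 2 ^ (l.length / 2) ∧ i < l.length / 2 then
            let item := (PySem.List.pyGet? l ((i : Nat) : Int)).getD (0, 0)
            ((s.1.1 + item.1, s.1.2 + item.2), s.2)
          else s
        else s) ((0, 0), (0, 0)) =
    ((List.range ((l.length + 1) / 2)).foldl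
      (fun (s : Int × Int) i =>
        if b.testBit i ∧ b < 2 ^ (l.length / 2) ∧ i < l.length / 2
        then (s.1 + ((PySem.List.pyGet? l ((i : Nat) : Int)).getD (0,0)).1,
              s.2 + ((PySem.List.pyGet? l ((i : Nat) : Int)).getD (0,0)).2)
        else s) (0, 0),
     (List.range ((l.length + 1) / 2)).foldl
      (fun (s : Int × Int) i =>
        if b.testBit i
        then (s.1 + ((PySem.List.pyGet? l ((l.length / 2 + i : Nat) : Int)).getD (0,0)).1,
              s.2 + ((PySem.List.pyGet? l ((l.length / 2 + i : Nat) : Int)).getD (0,0)).2)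
        else s) (0, 0)) := by
  rw [← PySem.List.foldl_prod_mk]
  apply PySem.List.foldl_congr_mem
  intro acc x hx
  by_cases h1 : b.testBit x
  · by_cases h2 : b < 2 ^ (l.length / 2) ∧ x < l.length / 2 <;> simp [h1, h2]
  · simp [h1]

theorem halfcomb_eq_alt (l : List (Int × Int)) : halfcomb l = halfcomb_alt l := by
  have h12 : (2:Nat) ^ (l.length / 2) ≤ 2 ^ ((l.length + 1) / 2) :=
    Nat.pow_le_pow_right (by norm_num) (by omega)
  have hpos : 1 ≤ (2:Nat) ^ (l.length / 2) := Nat.one_le_two_pow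
  unfold halfcomb
  simp only []
  rw [PySem.List.foldl_congr_mem _ _
    (fun (acc : List (Int × Int) × List (Int × Int)) b =>
      ((if b < 2 ^ (l.length / 2) then acc.1 ++ [msum (l.take (l.length / 2)) b] else acc.1),
        acc.2 ++ [msum (l.drop (l.length / 2)) b]))
    _ ?_]
  · rw [PySem.List.foldl_prod_mk
      (f := fun acc b => if b < 2 ^ (l.length / 2)
        then acc ++ [msum (l.take (l.length / 2)) b] else acc)
      (g := fun acc b => acc ++ [msum (l.drop (l.length / 2)) b])]
    show _ = (subsums (l.take (l.length / 2)), subsums (l.drop (l.length / 2)))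
    unfold subsums
    rw [subsumsAll_eq, subsumsAll_eq]
    have hlen1 : (l.take (l.length / 2)).length = l.length / 2 := by simp; omega
    have hlen2 : (l.drop (l.length / 2)).length = (l.length + 1) / 2 := by simp; omega
    rw [hlen1, hlen2]
    refine Prod.ext ?_ ?_
    · -- first component
      have hsplit : (2:Nat) ^ ((l.length + 1) / 2) =
          2 ^ (l.length / 2) + (2 ^ ((l.length + 1) / 2) - 2 ^ (l.length / 2)) := by omega
      rw [hsplit, List.range_add,
        List.drop_append_of_le_length (by simpa using hpos), List.foldl_append]
      rw [PySem.List.foldl_congr_mem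
        ((List.range (2 ^ (l.length / 2))).drop 1) _
        (fun acc b => acc ++ [msum (l.take (l.length / 2)) b]) _ ?_]
      · rw [PySem.List.foldl_append_singleton_eq_map]
        rw [PySem.List.foldl_congr_mem _ _ (fun s _ => s) _ ?_]
        · rw [foldl_id]
          simp only [List.nil_append, List.map_drop]
        · intro acc x hx
          simp only [List.mem_map] at hx
          obtain ⟨y, _, rfl⟩ := hx
          have : ¬ (2 ^ (l.length / 2) + y < 2 ^ (l.length / 2)) := by omega
          simp [this]
      · intro acc x hx
        have : x < 2 ^ (l.length / 2) :=
          List.mem_range.mp (List.mem_of_mem_drop hx)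
        simp [this]
    · -- second component
      rw [PySem.List.foldl_append_singleton_eq_map]
      simp only [List.nil_append, List.map_drop]
  · intro acc b hb
    rw [foldA_split l b, foldA_snd l b]
    by_cases hblt : b < 2 ^ (l.length / 2)
    · rw [foldA_fst l b hblt]
    · simp [hblt]

-- ===== VERDICT (by name: the statement is the Claim_ definition above) =====
theorem halfcomb_spec : Claim_equal_halfcomb := by
  intro l _
  unfold Spec_halfcomb
  exact halfcomb_eq_alt l
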